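-- pv_equiv track=rewrite | github.com/repengine/pulse | simulation_engine/simulation_drift_detector.py | compare_rule_patterns
-- ===== SOURCE A (Python) =====
-- from typing import List, Dict, Tuple, Optional
-- from collections import Counter
--
-- def compare_rule_patterns(prev: List[Dict], curr: List[Dict]) -> Dict[str, int]:
--     """Count how many times each rule was triggered in both runs."""
--     def count_rules(trace):
--         c = Counter()
--         for step in trace:
--             for rule_id in step.get("fired_rules", []):
--                 c[rule_id] += 1
--         return c
--
--     prev_counts = count_rules(prev)
--     curr_counts = count_rules(curr)
--     all_rules = set(prev_counts) | set(curr_counts)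
--
--     delta = {r: curr_counts.get(r, 0) - prev_counts.get(r, 0) for r in all_rules}
--     return delta
-- ===== SOURCE B (Python) =====
-- def compare_rule_patterns(prev, curr):
--     """Count how many times each rule was triggered in both runs."""
--     delta = {}
--     for step in prev:
--         for r in step.get("fired_rules", []):
--             delta[r] = delta.get(r, 0) - 1
--     for step in curr:
--         for r in step.get("fired_rules", []):
--             delta[r] = delta.get(r, 0) + 1
--     return delta
-- ===== Notes on version B (the rewrite author's own statement) =====
-- stated objective: simpler
-- what changed: Replaces the two intermediate Counters, the set union of their key sets and the final delta comprehension by a single accumulating dict: one pass over prev subtracting 1 per firing, one pass over curr adding 1 per firing, returned directly.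
import Mathlib
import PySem

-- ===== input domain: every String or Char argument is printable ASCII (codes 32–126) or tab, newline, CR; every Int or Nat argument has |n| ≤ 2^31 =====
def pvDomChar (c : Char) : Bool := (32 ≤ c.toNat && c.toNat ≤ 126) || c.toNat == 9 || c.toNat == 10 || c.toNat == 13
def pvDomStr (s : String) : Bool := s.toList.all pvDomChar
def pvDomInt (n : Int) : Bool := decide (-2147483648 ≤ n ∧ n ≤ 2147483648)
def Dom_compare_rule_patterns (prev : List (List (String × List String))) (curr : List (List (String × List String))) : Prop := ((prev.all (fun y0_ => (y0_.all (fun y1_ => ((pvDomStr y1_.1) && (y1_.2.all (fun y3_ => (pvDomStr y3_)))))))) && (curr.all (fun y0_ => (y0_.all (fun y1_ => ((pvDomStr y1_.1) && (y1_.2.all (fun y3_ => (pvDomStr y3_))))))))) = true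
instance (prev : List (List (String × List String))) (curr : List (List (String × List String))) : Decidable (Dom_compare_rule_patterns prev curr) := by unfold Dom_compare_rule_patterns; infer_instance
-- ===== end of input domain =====

-- B replaces A's two Counters + set union + delta comprehension by one dict filled in a
-- subtracting pass over prev and an adding pass over curr (objective: simpler).
-- Note: A's returned dict is built by iterating a Python set (hash order); dict outputs are
-- compared as key-value sets, and the port fixes the deterministic prev-then-curr key order.

-- ===== PORT A =====
-- helper = A's inner 'count_rules(trace)': Counter over every step's "fired_rules"
def pvCountRules (trace : List (List (String × List String))) : PySem.Dict String Int :=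
  trace.foldl
    (fun c step =>
      ((PySem.Dict.mk step).getD "fired_rules" []).foldl
        (fun c rule_id => c.modify rule_id 0 (fun v => v + 1)) c)
    PySem.Dict.empty

def compare_rule_patterns (prev : List (List (String × List String))) (curr : List (List (String × List String))) : List (String × Int) :=
  let prev_counts := pvCountRules prev
  let curr_counts := pvCountRules curr
  let all_rules : PySem.Set String :=
    (PySem.Set.ofList prev_counts.keys).union (PySem.Set.ofList curr_counts.keys)
  all_rules.map (fun r => (r, curr_counts.getD r 0 - prev_counts.getD r 0))

-- ===== PORT B =====
def compare_rule_patterns_alt (prev : List (List (String × List String))) (curr : List (List (String × List String))) : List (String × Int) :=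
  let d1 := prev.foldl
    (fun d step =>
      ((PySem.Dict.mk step).getD "fired_rules" []).foldl
        (fun d r => d.insert r (d.getD r 0 - 1)) d)
    PySem.Dict.empty
  let d2 := curr.foldl
    (fun d step =>
      ((PySem.Dict.mk step).getD "fired_rules" []).foldl
        (fun d r => d.insert r (d.getD r 0 + 1)) d)
    d1
  d2.items

-- ===== PRECONDITION & SPEC =====
def Spec_compare_rule_patterns (prev : List (List (String × List String))) (curr : List (List (String × List String))) (out : List (String × Int)) : Prop := out = compare_rule_patterns_alt prev curr
instance (prev : List (List (String × List String))) (curr : List (List (String × List String))) (out : List (String × Int)) : Decidable (Spec_compare_rule_patterns prev curr out) := by unfold Spec_compare_rule_patterns; infer_instance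

-- ===== CLAIM (what is proved, stated in full; the proofs are below) =====
def Claim_equal_compare_rule_patterns : Prop := ∀ (prev : List (List (String × List String))) (curr : List (List (String × List String))), Dom_compare_rule_patterns prev curr → Spec_compare_rule_patterns prev curr (compare_rule_patterns prev curr)

-- ===== LEMMAS AND PROOFS =====

-- the flattened list of rule ids a trace fires, in order
def pvFlat (trace : List (List (String × List String))) : List String :=
  trace.flatMap (fun step => (PySem.Dict.mk step).getD "fired_rules" [])

lemma pv_add_of_mem {α : Type} [BEq α] [LawfulBEq α] (s : PySem.Set α) (x : α) (h : x ∈ s) :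
    PySem.Set.add s x = s := by
  unfold PySem.Set.add
  rw [if_pos ((PySem.Set.contains_iff s x).mpr h)]

lemma pv_add_of_not_mem {α : Type} [BEq α] [LawfulBEq α] (s : PySem.Set α) (x : α) (h : x ∉ s) :
    PySem.Set.add s x = s ++ [x] := by
  unfold PySem.Set.add
  rw [if_neg (fun hc => h ((PySem.Set.contains_iff s x).mp hc))]

lemma pv_mem_foldl_add_left {α : Type} [BEq α] [LawfulBEq α] (u : List α) :
    ∀ (s : PySem.Set α) (x : α), x ∈ s → x ∈ List.foldl PySem.Set.add s u := by
  induction u with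
  | nil => intro s x h; exact h
  | cons c u ih =>
    intro s x h
    exact ih _ x ((PySem.Set.mem_add s c x).mpr (Or.inl h))

lemma pv_mem_foldl_add {α : Type} [BEq α] [LawfulBEq α] (u : List α) :
    ∀ (s : PySem.Set α) (x : α), x ∈ u → x ∈ List.foldl PySem.Set.add s u := by
  induction u with
  | nil => intro s x h; cases h
  | cons c u ih =>
    intro s x h
    rcases List.mem_cons.mp h with h | h
    · exact pv_mem_foldl_add_left u _ x ((PySem.Set.mem_add s c x).mpr (Or.inr h))
    · exact ih _ x h

lemma pv_foldl_add_foldl_add {α : Type} [BEq α] [LawfulBEq α] (C : List α) :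
    ∀ (s u : PySem.Set α),
      List.foldl PySem.Set.add s (List.foldl PySem.Set.add u C)
        = List.foldl PySem.Set.add (List.foldl PySem.Set.add s u) C := by
  induction C with
  | nil => intro s u; rfl
  | cons c C ih =>
    intro s u
    simp only [List.foldl_cons]
    rw [ih]
    congr 1
    by_cases hu : c ∈ u
    · rw [pv_add_of_mem u c hu, pv_add_of_mem _ c (pv_mem_foldl_add u s c hu)]
    · rw [pv_add_of_not_mem u c hu, List.foldl_append]
      rfl

lemma pv_ofList_foldl_add {α : Type} [BEq α] [LawfulBEq α] (s : PySem.Set α) (C : List α) :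
    List.foldl PySem.Set.add s (PySem.Set.ofList C) = List.foldl PySem.Set.add s C := by
  rw [PySem.Set.ofList, pv_foldl_add_foldl_add]
  rfl

lemma pv_keys_insert {κ ν : Type} [BEq κ] [LawfulBEq κ] (d : PySem.Dict κ ν) (k : κ) (v : ν) :
    (d.insert k v).keys = PySem.Set.add d.keys k := by
  have hmem : d.contains k = true ↔ k ∈ d.keys := by
    constructor
    · intro hc
      obtain ⟨p, hp, hb⟩ := List.any_eq_true.mp hc
      exact List.mem_map.mpr ⟨p, hp, eq_of_beq hb⟩
    · intro hm
      obtain ⟨p, hp, he⟩ := List.mem_map.mp hm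
      exact List.any_eq_true.mpr ⟨p, hp, beq_iff_eq.mpr he⟩
  by_cases h : d.contains k = true
  · rw [pv_add_of_mem _ k (hmem.mp h)]
    simp only [PySem.Dict.insert, h, if_true, PySem.Dict.keys, List.map_map]
    apply List.map_congr_left
    intro p _
    by_cases hp : (p.1 == k) = true
    · simp [eq_of_beq hp]
    · simp [hp]
  · rw [pv_add_of_not_mem _ k (fun hm => h (hmem.mpr hm))]
    simp [PySem.Dict.insert, h, PySem.Dict.keys]

lemma pv_keys_foldl_insert {κ ν : Type} [BEq κ] [LawfulBEq κ]
    (f : PySem.Dict κ ν → κ → ν) (xs : List κ) :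
    ∀ (d : PySem.Dict κ ν),
      (List.foldl (fun d r => d.insert r (f d r)) d xs).keys
        = List.foldl PySem.Set.add d.keys xs := by
  induction xs with
  | nil => intro d; rfl
  | cons x xs ih =>
    intro d
    simp only [List.foldl_cons]
    rw [ih, pv_keys_insert]

lemma pv_getD_foldl_insert_sub (xs : List String) :
    ∀ (d : PySem.Dict String Int) (k : String),
      (List.foldl (fun d r => d.insert r (d.getD r 0 - 1)) d xs).getD k 0
        = d.getD k 0 - (xs.count k : Int) := by
  induction xs with
  | nil => intro d k; simp
  | cons x xs ih =>
    intro d k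
    simp only [List.foldl_cons]
    rw [ih]
    by_cases hx : k = x
    · subst hx
      rw [PySem.Dict.getD_insert_self]
      simp [List.count_cons]
      ring
    · rw [PySem.Dict.getD_insert_of_ne _ _ _ hx]
      have : (x == k) = false := by simpa using fun h => hx h.symm
      simp [List.count_cons, this]

lemma pv_getD_foldl_insert_add (xs : List String) :
    ∀ (d : PySem.Dict String Int) (k : String),
      (List.foldl (fun d r => d.insert r (d.getD r 0 + 1)) d xs).getD k 0
        = d.getD k 0 + (xs.count k : Int) := by
  induction xs with
  | nil => intro d k; simp
  | cons x xs ih =>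
    intro d k
    simp only [List.foldl_cons]
    rw [ih]
    by_cases hx : k = x
    · subst hx
      rw [PySem.Dict.getD_insert_self]
      simp [List.count_cons]
      ring
    · rw [PySem.Dict.getD_insert_of_ne _ _ _ hx]
      have : (x == k) = false := by simpa using fun h => hx h.symm
      simp [List.count_cons, this]

-- A's nested count loop is Counter over the flattened rule ids
lemma pv_countRules_eq_counter (trace : List (List (String × List String))) :
    pvCountRules trace = PySem.Dict.counter (pvFlat trace) := by
  rw [PySem.Dict.counter_eq_foldl, pvFlat, List.foldl_flatMap]
  rfl

-- A's result in closed form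
lemma pv_A_closed (prev curr : List (List (String × List String))) :
    compare_rule_patterns prev curr
      = (PySem.Set.ofList (pvFlat prev ++ pvFlat curr)).map
          (fun r => (r, ((pvFlat curr).count r : Int) - ((pvFlat prev).count r : Int))) := by
  simp only [compare_rule_patterns]
  rw [pv_countRules_eq_counter, pv_countRules_eq_counter]
  have hkeys : ((PySem.Set.ofList (PySem.Dict.counter (pvFlat prev)).keys).union
      (PySem.Set.ofList (PySem.Dict.counter (pvFlat curr)).keys))
        = PySem.Set.ofList (pvFlat prev ++ pvFlat curr) := by
    rw [PySem.Dict.keys_counter, PySem.Dict.keys_counter]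
    show List.foldl PySem.Set.add (PySem.Set.ofList (PySem.Set.ofList (pvFlat prev)))
        (PySem.Set.ofList (PySem.Set.ofList (pvFlat curr))) = _
    rw [pv_ofList_foldl_add, pv_ofList_foldl_add]
    show List.foldl PySem.Set.add
        (List.foldl PySem.Set.add PySem.Set.empty (PySem.Set.ofList (pvFlat prev))) _ = _
    rw [pv_ofList_foldl_add]
    rw [PySem.Set.ofList, List.foldl_append]
  rw [hkeys]
  apply List.map_congr_left
  intro r _
  rw [PySem.Dict.getD_counter, PySem.Dict.getD_counter]

-- B's result in the same closed form
lemma pv_B_closed (prev curr : List (List (String × List String))) :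
    compare_rule_patterns_alt prev curr
      = (PySem.Set.ofList (pvFlat prev ++ pvFlat curr)).map
          (fun r => (r, ((pvFlat curr).count r : Int) - ((pvFlat prev).count r : Int))) := by
  simp only [compare_rule_patterns_alt]
  rw [← List.foldl_flatMap, ← List.foldl_flatMap]
  rw [show List.flatMap (fun step => PySem.Dict.getD {items := step} "fired_rules" []) prev
        = pvFlat prev from rfl,
      show List.flatMap (fun step => PySem.Dict.getD {items := step} "fired_rules" []) curr
        = pvFlat curr from rfl]
  set d2 : PySem.Dict String Int := List.foldl (fun d r => d.insert r (d.getD r 0 + 1))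
      (List.foldl (fun d r => d.insert r (d.getD r 0 - 1)) PySem.Dict.empty (pvFlat prev))
      (pvFlat curr) with hd2
  have hkeys : d2.keys = PySem.Set.ofList (pvFlat prev ++ pvFlat curr) := by
    rw [hd2, pv_keys_foldl_insert (fun d r => d.getD r 0 + 1),
        pv_keys_foldl_insert (fun d r => d.getD r 0 - 1)]
    rw [PySem.Set.ofList, List.foldl_append]
    rfl
  have hnd : d2.keys.Nodup := by
    rw [hkeys]; exact PySem.Set.nodup_ofList _
  rw [PySem.Dict.items_eq_map_keys d2 hnd 0, hkeys]
  apply List.map_congr_left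
  intro r _
  rw [hd2, pv_getD_foldl_insert_add, pv_getD_foldl_insert_sub]
  have : (PySem.Dict.empty : PySem.Dict String Int).getD r 0 = 0 := rfl
  rw [this]
  ring_nf

-- ===== VERDICT (by name: the statement is the Claim_ definition above) =====
theorem compare_rule_patterns_spec : Claim_equal_compare_rule_patterns := by
  intro prev curr _
  unfold Spec_compare_rule_patterns
  rw [pv_A_closed, pv_B_closed]
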